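-- pv_equiv track=rewrite | github.com/Kaustubhbajpai7777/ACC45DAYSOFCODE-2024 | D-2.REMOVEBAD.py | min_operations_to_make_elements_same
-- ===== SOURCE A (Python) =====
-- def min_operations_to_make_elements_same(test_cases):
--     results = []
--
--     for case in test_cases:
--         N, A = case
--         frequency = {}
--
--         for num in A:
--             if num in frequency:
--                 frequency[num] += 1
--             else:
--                 frequency[num] = 1
--
--         max_frequency = max(frequency.values())
--
--         min_operations = N - max_frequency
--         results.append(min_operations)
--
--     return results
-- ===== SOURCE B (Python) =====
-- def min_operations_to_make_elements_same(test_cases):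
--     # Sort-and-scan: in a sorted copy of A equal elements are contiguous, so the
--     # highest multiplicity is the longest run of equal neighbours; the answer is
--     # N minus that longest run.  No frequency dictionary is built.
--     results = []
--     for N, A in test_cases:
--         best = cur = 0
--         prev = None
--         for x in sorted(A):
--             cur = cur + 1 if prev == x else 1
--             if cur > best:
--                 best = cur
--             prev = x
--         results.append(N - best)
--     return results
-- ===== Notes on version B (the rewrite author's own statement) =====
-- stated objective: alternative
-- what changed: Replaces the frequency dictionary plus max over its values by sorting each list and scanning it once for the longest run of equal neighbours (the highest multiplicity).
import Mathlib
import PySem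

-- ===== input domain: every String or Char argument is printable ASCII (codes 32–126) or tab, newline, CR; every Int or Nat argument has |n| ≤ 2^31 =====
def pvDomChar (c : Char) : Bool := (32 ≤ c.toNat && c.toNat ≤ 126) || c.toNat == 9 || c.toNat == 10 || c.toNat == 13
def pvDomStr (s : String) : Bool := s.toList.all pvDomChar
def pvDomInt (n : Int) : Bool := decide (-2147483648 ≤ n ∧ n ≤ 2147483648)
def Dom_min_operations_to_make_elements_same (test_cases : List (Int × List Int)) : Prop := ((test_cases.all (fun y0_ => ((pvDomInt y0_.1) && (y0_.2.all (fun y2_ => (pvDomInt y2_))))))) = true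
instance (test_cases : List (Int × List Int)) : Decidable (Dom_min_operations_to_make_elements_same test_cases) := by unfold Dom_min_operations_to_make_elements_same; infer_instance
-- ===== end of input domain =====

-- B sorts each case's list and scans for the longest run of equal neighbours instead of building a frequency dictionary (alternative algorithm, not faster).


-- ===== PORT A =====
def min_operations_to_make_elements_same (test_cases : List (Int × List Int)) : List Int :=
  test_cases.foldl (fun results case =>
    let N := case.1
    let A := case.2
    let frequency : PySem.Dict Int Int :=
      A.foldl (fun d num =>
        if d.contains num then d.insert num (d.getD num 0 + 1)   -- frequency[num] += 1
        else d.insert num 1) PySem.Dict.empty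
    match PySem.List.max? frequency.values (fun v => v) with
    | some max_frequency => results ++ [N - max_frequency]
    | none => results     -- max({}.values()) raises ValueError: unreachable under Pre_
    ) []

-- ===== PORT B =====
-- one step of B's inner scan: state = (best run so far, current run, previous element)
def pvRunStep (s : Int × Int × Option Int) (x : Int) : Int × Int × Option Int :=
  let cur := if s.2.2 = some x then s.2.1 + 1 else 1
  let best := if cur > s.1 then cur else s.1
  (best, cur, some x)

def min_operations_to_make_elements_same_alt (test_cases : List (Int × List Int)) : List Int :=
  test_cases.foldl (fun results case =>
    let N := case.1
    let A := case.2
    let st := (PySem.List.sorted A (fun x => x) false).foldl pvRunStep (0, 0, none)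
    results ++ [N - st.1]) []

-- ===== PRECONDITION & SPEC =====
-- Pre_ excludes exactly the cases with an empty element list, on which Python A raises ValueError (max of an empty sequence).
def Pre_min_operations_to_make_elements_same (test_cases : List (Int × List Int)) : Prop :=
  ∀ case ∈ test_cases, case.2 ≠ []
instance (test_cases : List (Int × List Int)) : Decidable (Pre_min_operations_to_make_elements_same test_cases) := by unfold Pre_min_operations_to_make_elements_same; infer_instance
def pvWitness_min_operations_to_make_elements_same : (List (Int × List Int)) := [(5, [1, 2, 2, 3, 2]), (3, [4, 4, 4])]
def Spec_min_operations_to_make_elements_same (test_cases : List (Int × List Int)) (out : List Int) : Prop := out = min_operations_to_make_elements_same_alt test_cases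
instance (test_cases : List (Int × List Int)) (out : List Int) : Decidable (Spec_min_operations_to_make_elements_same test_cases out) := by unfold Spec_min_operations_to_make_elements_same; infer_instance

-- ===== CLAIM (what is proved, stated in full; the proofs are below) =====
def Claim_equal_min_operations_to_make_elements_same : Prop := ∀ (test_cases : List (Int × List Int)), Dom_min_operations_to_make_elements_same test_cases → Pre_min_operations_to_make_elements_same test_cases → Spec_min_operations_to_make_elements_same test_cases (min_operations_to_make_elements_same test_cases)

-- ===== LEMMAS AND PROOFS =====

-- A's branching counting loop is exactly the Counter fold.
theorem freq_loop_eq_counter (A : List Int) :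
    A.foldl (fun d num =>
      if d.contains num then d.insert num (d.getD num 0 + 1)
      else d.insert num 1) PySem.Dict.empty = PySem.Dict.counter A := by
  rw [← PySem.Dict.foldl_insert_getD_add_one_eq_counter]
  congr 1
  funext d num
  by_cases h : d.contains num
  · simp [h]
  · have h0 : d.getD num 0 = 0 := PySem.Dict.getD_of_not_contains d 0 (by simpa using h)
    simp [h, h0]

-- foldr max with a larger base
theorem foldr_max_base (l : List Int) (b x : Int) :
    l.foldr max (max b x) = max (l.foldr max b) x := by
  induction l with
  | nil => rfl
  | cons y t ih => simp [List.foldr_cons, ih, max_assoc]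

theorem le_foldr_max (l : List Int) (b v : Int) (h : v ∈ l) : v ≤ l.foldr max b := by
  induction l with
  | nil => cases h
  | cons y t ih =>
    simp only [List.foldr_cons]
    rcases List.mem_cons.mp h with rfl | h
    · exact le_max_left _ _
    · exact (ih h).trans (le_max_right _ _)

theorem base_le_foldr_max (l : List Int) (b : Int) : b ≤ l.foldr max b := by
  induction l with
  | nil => simp
  | cons y t ih =>
    simp only [List.foldr_cons]
    exact ih.trans (le_max_right _ _)

-- absorb an extra element v into the base w when w ≤ v and v is either w or listed
theorem max_foldr_absorb (l : List Int) (b v w : Int) (hw : w ≤ v) (hv : v = w ∨ v ∈ l) :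
    max v (l.foldr max b) = l.foldr max (max b w) := by
  rw [foldr_max_base]
  rcases hv with rfl | hv
  · exact max_comm _ _
  · have h1 : v ≤ l.foldr max b := le_foldr_max l b v hv
    rw [max_eq_right h1, max_eq_left (hw.trans h1)]

-- foldr max b l is b or an element of l
theorem foldr_max_cases (l : List Int) (b : Int) :
    l.foldr max b = b ∨ l.foldr max b ∈ l := by
  induction l with
  | nil => exact Or.inl rfl
  | cons y t ih =>
    simp only [List.foldr_cons]
    rcases le_total y (t.foldr max b) with h | h
    · rw [max_eq_right h]
      rcases ih with h' | h'
      · exact Or.inl h'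
      · exact Or.inr (List.mem_cons_of_mem _ h')
    · rw [max_eq_left h]
      exact Or.inr List.mem_cons_self

-- THE INVARIANT of B's scan: over a sorted suffix S whose elements all dominate the
-- previous element a, the final best is the foldr-max of the full multiplicities
-- (the run of a being extended by the pending current-run length c).
theorem runStep_invariant (S : List Int) :
    ∀ (a b c : Int), S.Pairwise (· ≤ ·) → (∀ x ∈ S, a ≤ x) →
    (S.foldl pvRunStep (b, c, some a)).1 =
      (S.map (fun x => (S.count x : Int) + if x = a then c else 0)).foldr max b := by
  induction S with
  | nil => intro a b c _ _; rfl
  | cons y T ih =>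
    intro a b c hpw hge
    have hpwT : T.Pairwise (· ≤ ·) := hpw.of_cons
    have hyT : ∀ x ∈ T, y ≤ x := fun x hx => (List.pairwise_cons.mp hpw).1 x hx
    by_cases hya : y = a
    · subst hya
      -- the run of y continues: cur = c+1, best = max b (c+1)
      have hstep : pvRunStep (b, c, some y) y = (max b (c + 1), c + 1, some y) := by
        simp [pvRunStep, max_def]; omega
      have hmapeq : (y :: T).map (fun x => (((y :: T).count x : Int)) + if x = y then c else 0)
          = (y :: T).map (fun x => ((T.count x : Int) + if x = y then c + 1 else 0)) :=
        List.map_congr_left (fun x _ => by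
          by_cases hxy : x = y <;> simp [List.count_cons, hxy] <;> try (push_cast; omega))
      rw [List.foldl_cons, hstep, ih y (max b (c+1)) (c+1) hpwT hyT, hmapeq]
      simp only [List.map_cons, List.foldr_cons]
      refine (max_foldr_absorb _ b _ (c+1) (by simp only [if_true]; omega) ?_).symm
      by_cases h0 : y ∈ T
      · exact Or.inr (List.mem_map.mpr ⟨y, h0, by simp⟩)
      · left; simp [List.count_eq_zero.mpr h0]
    · -- a new value starts: cur = 1, best = max b 1; also a occurs nowhere in y :: T
      have hna : a ∉ (y :: T) := by
        intro hmem
        rcases List.mem_cons.mp hmem with rfl | hmem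
        · exact hya rfl
        · exact hya (le_antisymm (hyT a hmem) (hge y List.mem_cons_self))
      have hstep : pvRunStep (b, c, some a) y = (max b 1, 1, some y) := by
        simp [pvRunStep, max_def, Ne.symm hya]; omega
      have hmapeq : (y :: T).map (fun x => (((y :: T).count x : Int)) + if x = a then c else 0)
          = (y :: T).map (fun x => ((T.count x : Int) + if x = y then 1 else 0)) :=
        List.map_congr_left (fun x hx => by
          have hxa : x ≠ a := fun h => hna (h ▸ hx)
          by_cases hxy : x = y <;> simp [List.count_cons, hxy, hxa] <;> try (push_cast; omega))
      rw [List.foldl_cons, hstep, ih y (max b 1) 1 hpwT hyT, hmapeq]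
      simp only [List.map_cons, List.foldr_cons]
      refine (max_foldr_absorb _ b _ 1 (by simp only [if_true]; omega) ?_).symm
      by_cases h0 : y ∈ T
      · exact Or.inr (List.mem_map.mpr ⟨y, h0, by simp⟩)
      · left; simp [List.count_eq_zero.mpr h0]

-- B's best over a sorted nonempty list: it IS some multiplicity and dominates all of them.
theorem bestRun_spec (S : List Int) (hpw : S.Pairwise (· ≤ ·)) (hne : S ≠ []) :
    (∃ x ∈ S, (S.foldl pvRunStep (0, 0, none)).1 = (S.count x : Int)) ∧
    (∀ x ∈ S, (S.count x : Int) ≤ (S.foldl pvRunStep (0, 0, none)).1) := by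
  obtain ⟨y, T, rfl⟩ := List.exists_cons_of_ne_nil hne
  have hstep : pvRunStep ((0 : Int), (0 : Int), (none : Option Int)) y = (1, 1, some y) := by
    simp [pvRunStep]
  have hpwT : T.Pairwise (· ≤ ·) := hpw.of_cons
  have hyT : ∀ x ∈ T, y ≤ x := fun x hx => (List.pairwise_cons.mp hpw).1 x hx
  have hr : ((y :: T).foldl pvRunStep (0, 0, none)).1 =
      (T.map (fun x => (T.count x : Int) + if x = y then 1 else 0)).foldr max 1 := by
    rw [List.foldl_cons, hstep, runStep_invariant T y 1 1 hpwT hyT]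
  have hcnt : ∀ x : Int, (((y :: T).count x : Int)) = (T.count x : Int) + if x = y then 1 else 0 := by
    intro x
    by_cases hxy : x = y <;> simp [List.count_cons, hxy] <;> try (push_cast; omega)
  constructor
  · rcases foldr_max_cases (T.map fun x => (T.count x : Int) + if x = y then 1 else 0) 1 with h | h
    · -- best = 1; then count (y::T) y = 1 (y repeated would exceed the bound)
      refine ⟨y, List.mem_cons_self, ?_⟩
      rw [hr, h, hcnt y, if_pos rfl]
      by_cases h0 : y ∈ T
      · exfalso
        have hv := le_foldr_max (T.map fun x => (T.count x : Int) + if x = y then 1 else 0) 1 _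
          (List.mem_map.mpr ⟨y, h0, rfl⟩)
        rw [if_pos rfl, h] at hv
        have hcp : 1 ≤ T.count y := List.one_le_count_iff.mpr h0
        omega
      · simp [List.count_eq_zero.mpr h0]
    · rcases List.mem_map.mp h with ⟨x, hx, hxeq⟩
      exact ⟨x, List.mem_cons_of_mem _ hx, by rw [hr, ← hxeq, hcnt x]⟩
  · intro x hx
    rw [hr, hcnt x]
    rcases List.mem_cons.mp hx with rfl | hxT
    · rw [if_pos rfl]
      by_cases h0 : x ∈ T
      · have hv := le_foldr_max (T.map fun z => (T.count z : Int) + if z = x then 1 else 0) 1 _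
          (List.mem_map.mpr ⟨x, h0, rfl⟩)
        rw [if_pos rfl] at hv
        exact hv
      · simp only [List.count_eq_zero.mpr h0]
        have := base_le_foldr_max (T.map fun z => (T.count z : Int) + if z = x then 1 else 0) 1
        omega
    · have hv := le_foldr_max (T.map fun z => (T.count z : Int) + if z = y then 1 else 0) 1 _
        (List.mem_map.mpr ⟨x, hxT, rfl⟩)
      rcases eq_or_ne x y with rfl | hxy
      · rw [if_pos rfl] at hv ⊢; exact hv
      · rw [if_neg hxy] at hv ⊢; exact hv

-- per case: A's max frequency (over the counter) equals B's longest sorted run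
theorem per_case_eq (A : List Int) (hA : A ≠ []) :
    PySem.List.max? (PySem.Dict.counter A).values (fun v => v) =
    some (((PySem.List.sorted A (fun x => x) false).foldl pvRunStep (0, 0, none)).1) := by
  have hperm : (PySem.List.sorted A (fun x => x) false).Perm A := PySem.List.sorted_perm A _ false
  have hSne : PySem.List.sorted A (fun x => x) false ≠ [] := by
    intro h
    exact hA ((PySem.List.sorted_eq_nil_iff A (fun x => x) false).mp h)
  have hpw : (PySem.List.sorted A (fun x => x) false).Pairwise (· ≤ ·) := by
    simpa using PySem.List.sorted_pairwise A (fun x => x)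
  obtain ⟨⟨x₁, hx₁, hbest⟩, hub⟩ := bestRun_spec _ hpw hSne
  have hval : (PySem.Dict.counter A).values
      = (PySem.Set.ofList A).map (fun k => (A.count k : Int)) := by
    show ((PySem.Dict.counter A).items).map (·.2) = _
    rw [PySem.Dict.items_counter]
    simp
  rw [hval]
  cases hm : PySem.List.max? ((PySem.Set.ofList A).map (fun k => (A.count k : Int))) (fun v => v) with
  | none =>
    exfalso
    have h0 := (PySem.List.max?_eq_none_iff _ _).mp hm
    have h1 : PySem.Set.ofList A = [] := List.map_eq_nil_iff.mp h0
    obtain ⟨z, T, rfl⟩ := List.exists_cons_of_ne_nil hA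
    have h2 : z ∈ PySem.Set.ofList (z :: T) := by
      rw [PySem.Set.mem_ofList]
      exact List.mem_cons_self
    rw [h1] at h2
    exact absurd h2 (List.not_mem_nil)
  | some m =>
    congr 1
    have hmmem := PySem.List.max?_mem hm
    rcases List.mem_map.mp hmmem with ⟨k, hk, rfl⟩
    have hkA : k ∈ A := by rwa [PySem.Set.mem_ofList] at hk
    have h1 : (A.count k : Int) ≤ ((PySem.List.sorted A (fun x => x) false).foldl pvRunStep (0, 0, none)).1 := by
      have := hub k (hperm.mem_iff.mpr hkA)
      rwa [hperm.count_eq] at this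
    have h2 : ((PySem.List.sorted A (fun x => x) false).foldl pvRunStep (0, 0, none)).1 ≤ (A.count k : Int) := by
      have hx₁A : x₁ ∈ A := hperm.mem_iff.mp hx₁
      have hmem : ((A.count x₁ : Nat) : Int) ∈ (PySem.Set.ofList A).map (fun k => (A.count k : Int)) :=
        List.mem_map.mpr ⟨x₁, by rw [PySem.Set.mem_ofList]; exact hx₁A, rfl⟩
      have h3 := PySem.List.max?_isMax hm _ hmem
      rw [hbest, hperm.count_eq]
      exact h3
    omega

-- the fold over the test cases, with a generalized accumulator
theorem foldl_eq_helper : ∀ (t : List (Int × List Int)), (∀ c ∈ t, c.2 ≠ []) → ∀ acc : List Int,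
    t.foldl (fun results case =>
      let N := case.1
      let A := case.2
      let frequency : PySem.Dict Int Int :=
        A.foldl (fun d num =>
          if d.contains num then d.insert num (d.getD num 0 + 1)
          else d.insert num 1) PySem.Dict.empty
      match PySem.List.max? frequency.values (fun v => v) with
      | some max_frequency => results ++ [N - max_frequency]
      | none => results) acc
    = t.foldl (fun results case =>
        results ++ [case.1 - ((PySem.List.sorted case.2 (fun x => x) false).foldl pvRunStep (0, 0, none)).1]) acc := by
  intro t
  induction t with
  | nil => intro _ acc; rfl
  | cons c t ih =>
    intro hp acc
    have hc : c.2 ≠ [] := hp c List.mem_cons_self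
    simp only [List.foldl_cons]
    rw [freq_loop_eq_counter, per_case_eq c.2 hc]
    exact ih (fun x hx => hp x (List.mem_cons_of_mem _ hx)) _

-- ===== VERDICT (by name: the statements are the Claim_ definitions above) =====
theorem min_operations_to_make_elements_same_spec : Claim_equal_min_operations_to_make_elements_same := by
  intro test_cases _ hpre
  unfold Spec_min_operations_to_make_elements_same
  unfold min_operations_to_make_elements_same min_operations_to_make_elements_same_alt
  exact foldl_eq_helper test_cases hpre []
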